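-- pv_equiv track=rewrite | github.com/ashleytsmith/Automating_materials_modelling | searching_algorithms/neighbour_search_example/benchmarking.py | generate_bin_shapes
-- ===== SOURCE A (Python) =====
-- def generate_bin_shapes(base_bins_shape,reps):
--
--     bins_shapes = []
--
--     current_bins_shape = base_bins_shape
--
--     bins_shapes.append(current_bins_shape)
--
--     reps = reps - 1
--
--     for i in range(0,reps):
--
--         current_bins_shape = tuple([2*x for x in current_bins_shape])
--         bins_shapes.append(current_bins_shape)
--
--     return bins_shapes
-- ===== SOURCE B (Python) =====
-- def generate_bin_shapes(base_bins_shape, reps):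
--     return [base_bins_shape] + [tuple(2**i * x for x in base_bins_shape)
--                                 for i in range(1, max(reps, 1))]
-- ===== Notes on version B (the rewrite author's own statement) =====
-- stated objective: simpler
-- what changed: Replaces the running accumulator that is doubled each iteration by a single comprehension computing each shape independently from the base via the closed form 2**i * x.
import Mathlib
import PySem

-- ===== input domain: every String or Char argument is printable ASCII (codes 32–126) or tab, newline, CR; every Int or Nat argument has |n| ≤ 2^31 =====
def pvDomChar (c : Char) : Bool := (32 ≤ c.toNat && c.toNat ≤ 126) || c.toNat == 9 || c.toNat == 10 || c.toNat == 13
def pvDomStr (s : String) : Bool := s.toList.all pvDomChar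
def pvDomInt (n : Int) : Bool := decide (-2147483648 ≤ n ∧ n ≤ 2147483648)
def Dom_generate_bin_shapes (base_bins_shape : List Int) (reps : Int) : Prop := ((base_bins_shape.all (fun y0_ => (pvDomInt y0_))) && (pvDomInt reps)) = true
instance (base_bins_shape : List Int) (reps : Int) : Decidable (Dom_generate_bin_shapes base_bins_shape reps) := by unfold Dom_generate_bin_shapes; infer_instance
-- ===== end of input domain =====

-- B replaces A's running doubled accumulator by a closed-form 2^i * x comprehension (objective: simpler).

-- ===== PORT A =====
def generate_bin_shapes (base_bins_shape : List Int) (reps : Int) : List (List Int) :=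
  -- bins_shapes = [base]; current = base; reps = reps - 1; for i in range(0, reps): double & append
  ((PySem.List.pyRange 0 (reps - 1) 1).foldl
    (fun (st : List (List Int) × List Int) _ =>
      let cur := st.2.map (fun x => 2 * x)
      (st.1 ++ [cur], cur))
    ([base_bins_shape], base_bins_shape)).1

-- ===== PORT B =====
def generate_bin_shapes_alt (base_bins_shape : List Int) (reps : Int) : List (List Int) :=
  [base_bins_shape] ++ (PySem.List.pyRange 1 (max reps 1) 1).map
    (fun i => base_bins_shape.map (fun x => 2 ^ i.toNat * x))

-- ===== PRECONDITION & SPEC =====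
def Spec_generate_bin_shapes (base_bins_shape : List Int) (reps : Int) (out : List (List Int)) : Prop := out = generate_bin_shapes_alt base_bins_shape reps
instance (base_bins_shape : List Int) (reps : Int) (out : List (List Int)) : Decidable (Spec_generate_bin_shapes base_bins_shape reps out) := by unfold Spec_generate_bin_shapes; infer_instance

-- ===== CLAIM (what is proved, stated in full; the proofs are below) =====
def Claim_equal_generate_bin_shapes : Prop := ∀ (base_bins_shape : List Int) (reps : Int), Dom_generate_bin_shapes base_bins_shape reps → Spec_generate_bin_shapes base_bins_shape reps (generate_bin_shapes base_bins_shape reps)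

-- ===== LEMMAS AND PROOFS =====

-- A's fold after n steps: the list of successive doublings, plus current = 2^n * base.
theorem genA_fold (base : List Int) (n : Nat) :
    ((PySem.List.pyRange 0 (n : Int) 1).foldl
      (fun (st : List (List Int) × List Int) _ =>
        let cur := st.2.map (fun x => 2 * x)
        (st.1 ++ [cur], cur))
      ([base], base))
    = ([base] ++ (List.range n).map (fun k => base.map (fun x => 2 ^ (k + 1) * x)),
       base.map (fun x => 2 ^ n * x)) := by
  induction n with
  | zero =>
      simp [PySem.List.pyRange_one_eq_nil]
  | succ n ih =>
      have hcast : ((n + 1 : Nat) : Int) = (n : Int) + 1 := by push_cast; ring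
      rw [hcast, PySem.List.pyRange_one_succ_right (by positivity), List.foldl_append, ih]
      simp only [List.foldl_cons, List.foldl_nil, List.range_succ, List.map_append, List.map_map]
      refine Prod.ext ?_ ?_
      · simp only [List.append_assoc, List.map_cons, List.map_nil]
        congr 2
        congr 1
        apply List.map_congr_left; intro x _
        simp only [Function.comp]
        ring
      · apply List.map_congr_left; intro x _
        simp only [Function.comp]
        ring

-- ===== VERDICT (by name: the statement is the Claim_ definition above) =====
theorem generate_bin_shapes_spec : Claim_equal_generate_bin_shapes := by
  intro base reps _
  unfold Spec_generate_bin_shapes generate_bin_shapes generate_bin_shapes_alt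
  by_cases h : reps ≤ 1
  · rw [PySem.List.pyRange_one_eq_nil (by omega), max_eq_right h,
        PySem.List.pyRange_one_eq_nil (by omega)]
    simp
  · have h : 1 < reps := by omega
    have hn : reps - 1 = ((reps - 1).toNat : Int) := by omega
    rw [hn, genA_fold, max_eq_left (by omega), PySem.List.pyRange_one]
    simp only [List.map_map]
    congr 1
    apply List.map_congr_left
    intro k hk
    simp only [Function.comp]
    rw [show (1 + (k : Int)).toNat = k + 1 by omega]
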